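-- pv_equiv track=rewrite | github.com/xcoga/Dating_LLM_sentiment_analysis | yolo_extract.py | extract_message_components
-- ===== SOURCE A (Python) =====
-- def extract_message_components(box_coordinates, classes):
--
--     chatframe = []
--     cur_user_boxes = []
--     oth_user_boxes = []
--     message_statuses = []
--     timestamps = []
--
--     count = 0
--
--     for val in classes:
--         #If class is chatframe
--         if val == 0:
--             chatframe.append(box_coordinates[count])
--         #If the class is current_user
--         elif val == 1:
--             cur_user_boxes.append(box_coordinates[count])
--         #If the class is other user
--         elif val == 2:
--             oth_user_boxes.append(box_coordinates[count])
--         #If class is message status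
--         elif val == 3:
--             message_statuses.append(box_coordinates[count])
--         #If class is timestamp
--         else:
--             timestamps.append(box_coordinates[count])
--
--         count+=1
--
--     return chatframe, cur_user_boxes, oth_user_boxes, message_statuses, timestamps
-- ===== SOURCE B (Python) =====
-- def extract_message_components(box_coordinates, classes):
--     pairs = list(zip(box_coordinates, classes))
--     chatframe = [b for b, c in pairs if c == 0]
--     cur_user_boxes = [b for b, c in pairs if c == 1]
--     oth_user_boxes = [b for b, c in pairs if c == 2]
--     message_statuses = [b for b, c in pairs if c == 3]
--     timestamps = [b for b, c in pairs if c not in (0, 1, 2, 3)]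
--     return chatframe, cur_user_boxes, oth_user_boxes, message_statuses, timestamps
-- ===== Notes on version B (the rewrite author's own statement) =====
-- stated objective: idiomatic
-- what changed: Replaces the single partitioning pass with a manual index counter and five mutable accumulators by zipping boxes with classes once and building each of the five outputs with its own filtering comprehension.
import Mathlib
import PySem

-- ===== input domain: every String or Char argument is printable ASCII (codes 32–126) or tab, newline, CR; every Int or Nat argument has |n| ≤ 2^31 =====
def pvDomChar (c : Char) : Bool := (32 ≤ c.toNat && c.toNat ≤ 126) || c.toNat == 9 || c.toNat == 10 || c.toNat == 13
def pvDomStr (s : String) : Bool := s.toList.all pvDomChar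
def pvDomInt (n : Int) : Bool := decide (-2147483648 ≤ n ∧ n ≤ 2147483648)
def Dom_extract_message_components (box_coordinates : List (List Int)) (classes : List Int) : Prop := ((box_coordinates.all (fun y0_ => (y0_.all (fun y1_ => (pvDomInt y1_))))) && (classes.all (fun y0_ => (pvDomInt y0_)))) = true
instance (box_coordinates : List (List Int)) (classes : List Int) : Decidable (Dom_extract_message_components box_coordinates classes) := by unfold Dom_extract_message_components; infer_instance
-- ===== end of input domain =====

-- B replaces A's single partitioning pass (index counter + five mutable accumulators)
-- by zip-then-five-filtering-comprehensions; idiomatic, same cost. Return values only.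

-- ===== PORT A =====
-- A's loop: one pass over classes with an int counter and five accumulators;
-- box_coordinates[count] is pyGet? (none = IndexError), excluded by Pre_ below.
def pvLoopA (bc : List (List Int)) : List Int → Int →
    List (List Int) → List (List Int) → List (List Int) → List (List Int) → List (List Int) →
    List (List Int) × List (List Int) × List (List Int) × List (List Int) × List (List Int)
  | [], _, cf, cu, ou, ms, ts => (cf, cu, ou, ms, ts)
  | v :: rest, count, cf, cu, ou, ms, ts =>
    let x := (PySem.List.pyGet? bc count).getD []
    if v == 0 then pvLoopA bc rest (count + 1) (cf ++ [x]) cu ou ms ts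
    else if v == 1 then pvLoopA bc rest (count + 1) cf (cu ++ [x]) ou ms ts
    else if v == 2 then pvLoopA bc rest (count + 1) cf cu (ou ++ [x]) ms ts
    else if v == 3 then pvLoopA bc rest (count + 1) cf cu ou (ms ++ [x]) ts
    else pvLoopA bc rest (count + 1) cf cu ou ms (ts ++ [x])

def extract_message_components (box_coordinates : List (List Int)) (classes : List Int) : List (List Int) × List (List Int) × List (List Int) × List (List Int) × List (List Int) :=
  pvLoopA box_coordinates classes 0 [] [] [] [] []

-- ===== PORT B =====
def extract_message_components_alt (box_coordinates : List (List Int)) (classes : List Int) : List (List Int) × List (List Int) × List (List Int) × List (List Int) × List (List Int) :=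
  let pairs := List.zip box_coordinates classes
  ((pairs.filter (fun p => p.2 == 0)).map Prod.fst,
   (pairs.filter (fun p => p.2 == 1)).map Prod.fst,
   (pairs.filter (fun p => p.2 == 2)).map Prod.fst,
   (pairs.filter (fun p => p.2 == 3)).map Prod.fst,
   (pairs.filter (fun p => !(p.2 == 0 || p.2 == 1 || p.2 == 2 || p.2 == 3))).map Prod.fst)

-- ===== PRECONDITION & SPEC =====
-- A raises IndexError (box_coordinates[count]) as soon as classes is longer than
-- box_coordinates; Pre_ excludes exactly those inputs.
def Pre_extract_message_components (box_coordinates : List (List Int)) (classes : List Int) : Prop :=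
  classes.length ≤ box_coordinates.length
instance (box_coordinates : List (List Int)) (classes : List Int) : Decidable (Pre_extract_message_components box_coordinates classes) := by unfold Pre_extract_message_components; infer_instance
def pvWitness_extract_message_components : List (List Int) × List Int := ([[1, 2], [3, 4], [5, 6]], [0, 3, 7])

def Spec_extract_message_components (box_coordinates : List (List Int)) (classes : List Int) (out : List (List Int) × List (List Int) × List (List Int) × List (List Int) × List (List Int)) : Prop := out = extract_message_components_alt box_coordinates classes
instance (box_coordinates : List (List Int)) (classes : List Int) (out : List (List Int) × List (List Int) × List (List Int) × List (List Int) × List (List Int)) : Decidable (Spec_extract_message_components box_coordinates classes out) := by unfold Spec_extract_message_components; infer_instance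

-- ===== CLAIM (what is proved, stated in full; the proofs are below) =====
def Claim_equal_extract_message_components : Prop := ∀ (box_coordinates : List (List Int)) (classes : List Int), Dom_extract_message_components box_coordinates classes → Pre_extract_message_components box_coordinates classes → Spec_extract_message_components box_coordinates classes (extract_message_components box_coordinates classes)

-- ===== LEMMAS AND PROOFS =====

-- Loop invariant: with counter n and n + |cs| ≤ |bc|, A's loop appends to each
-- accumulator exactly B's filtered projection of (bc.drop n).zip cs.
theorem pvLoopA_eq (bc : List (List Int)) : ∀ (cs : List Int) (n : Nat)
    (h : n + cs.length ≤ bc.length)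
    (cf cu ou ms ts : List (List Int)),
    pvLoopA bc cs (n : Int) cf cu ou ms ts =
      (cf ++ (((bc.drop n).zip cs).filter (fun p => p.2 == 0)).map Prod.fst,
       cu ++ (((bc.drop n).zip cs).filter (fun p => p.2 == 1)).map Prod.fst,
       ou ++ (((bc.drop n).zip cs).filter (fun p => p.2 == 2)).map Prod.fst,
       ms ++ (((bc.drop n).zip cs).filter (fun p => p.2 == 3)).map Prod.fst,
       ts ++ (((bc.drop n).zip cs).filter (fun p => !(p.2 == 0 || p.2 == 1 || p.2 == 2 || p.2 == 3))).map Prod.fst) := by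
  intro cs
  induction cs with
  | nil => intro n h cf cu ou ms ts; simp [pvLoopA]
  | cons v rest ih =>
    intro n h cf cu ou ms ts
    have hn : n < bc.length := by simp at h; omega
    have hdrop : bc.drop n = bc[n] :: bc.drop (n + 1) :=
      List.drop_eq_getElem_cons hn
    have hget : (PySem.List.pyGet? bc (n : Int)).getD [] = bc[n] := by
      rw [PySem.List.pyGet?_natCast, List.getElem?_eq_getElem hn]; rfl
    have hih : ∀ (cf cu ou ms ts : List (List Int)),
        pvLoopA bc rest ((n : Int) + 1) cf cu ou ms ts =
          (cf ++ (((bc.drop (n + 1)).zip rest).filter (fun p => p.2 == 0)).map Prod.fst,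
           cu ++ (((bc.drop (n + 1)).zip rest).filter (fun p => p.2 == 1)).map Prod.fst,
           ou ++ (((bc.drop (n + 1)).zip rest).filter (fun p => p.2 == 2)).map Prod.fst,
           ms ++ (((bc.drop (n + 1)).zip rest).filter (fun p => p.2 == 3)).map Prod.fst,
           ts ++ (((bc.drop (n + 1)).zip rest).filter (fun p => !(p.2 == 0 || p.2 == 1 || p.2 == 2 || p.2 == 3))).map Prod.fst) := by
      intro cf cu ou ms ts
      have hcast : ((n : Int) + 1) = ((n + 1 : Nat) : Int) := by push_cast; ring
      rw [hcast]
      exact ih (n + 1) (by simp at h ⊢; omega) cf cu ou ms ts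
    rw [hdrop, List.zip_cons_cons]
    simp only [pvLoopA, hget, List.filter_cons]
    split_ifs
    all_goals rw [hih]
    all_goals simp_all [List.append_assoc]

-- ===== VERDICT (by name: the statement is the Claim_ definition above) =====
theorem extract_message_components_spec : Claim_equal_extract_message_components := by
  intro bc cs _ hpre
  unfold Spec_extract_message_components extract_message_components extract_message_components_alt
  have := pvLoopA_eq bc cs 0 (by simpa using hpre) [] [] [] [] []
  simpa [List.zip] using this
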